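-- pv_equiv track=rewrite | github.com/stovecat/CGS | translation.py | convert_words_to_sentence
-- ===== SOURCE A (Python) =====
-- def convert_words_to_sentence(words): # with merging masks
--     '''
--     Input: a list of words (masked)
--     Output: a pair of <s1, s2>
--             - s1 is a string of words (adjacent masks are merged)
--             - s2 is a string of words (adjacent masks are merged)
--     '''
--     prev_mask = False
--     new_sentence_all_masks = ''
--     new_sentence = ''
--
--     for i in range(len(words)):
--         is_mask_word = words[i] == '<mask>'
--         new_sentence_all_masks += ' ' + words[i]
--         if prev_mask and is_mask_word:
--             continue
--         else:
--             new_sentence += ' ' + words[i]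
--             prev_mask = is_mask_word
--
--     return new_sentence.strip(), new_sentence_all_masks.strip()
-- ===== SOURCE B (Python) =====
-- def convert_words_to_sentence(words):
--     '''
--     Input: a list of words (masked)
--     Output: a pair of <s1, s2>
--             - s1 is a string of words (adjacent mask runs collapsed to one)
--             - s2 is a string of all words
--     '''
--     parts = []
--     i, n = 0, len(words)
--     while i < n:
--         w = words[i]
--         parts.append(w)
--         i += 1
--         if w == '<mask>':
--             while i < n and words[i] == '<mask>':
--                 i += 1
--     return ' '.join(parts).strip(), ' '.join(words).strip()
-- ===== Notes on version B (the rewrite author's own statement) =====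
-- stated objective: idiomatic
-- what changed: Replaces A's prev_mask state-flag pass that accumulates two strings by repeated concatenation with a run-skipping scan (an inner loop skips each mask run) that collects kept words in a list, plus a single ' '.join(...).strip() per output.
import Mathlib
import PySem

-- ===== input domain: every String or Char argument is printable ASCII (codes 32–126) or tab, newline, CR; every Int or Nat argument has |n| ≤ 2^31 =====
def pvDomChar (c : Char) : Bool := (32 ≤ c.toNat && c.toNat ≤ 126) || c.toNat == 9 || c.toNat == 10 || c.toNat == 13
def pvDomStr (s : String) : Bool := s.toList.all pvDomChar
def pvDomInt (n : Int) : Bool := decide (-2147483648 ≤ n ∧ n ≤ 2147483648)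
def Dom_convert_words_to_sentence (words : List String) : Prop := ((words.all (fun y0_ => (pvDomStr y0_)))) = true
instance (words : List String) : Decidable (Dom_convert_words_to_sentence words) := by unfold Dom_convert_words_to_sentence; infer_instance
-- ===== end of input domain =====

-- B replaces A's prev-mask flag single pass that accumulates two strings by a
-- run-skipping scan that collects the kept words in a list and joins each list once.

-- ===== PORT A =====
-- loop state: (prev_mask, new_sentence_all_masks, new_sentence)
def cwsStepA (st : Bool × String × String) (w : String) : Bool × String × String :=
  let is_mask_word := w == "<mask>"
  let all' := st.2.1 ++ " " ++ w
  if st.1 && is_mask_word then (st.1, all', st.2.2)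
  else (is_mask_word, all', st.2.2 ++ " " ++ w)

def convert_words_to_sentence (words : List String) : String × String :=
  let st := words.foldl cwsStepA (false, "", "")
  (PySem.Str.strip st.2.2, PySem.Str.strip st.2.1)

-- ===== PORT B =====
-- the outer while-loop of Source B; the inner while-loop skipping a mask run is dropWhile
def cwsParts : List String → List String
  | [] => []
  | w :: ws =>
    if w == "<mask>" then w :: cwsParts (ws.dropWhile (· == "<mask>"))
    else w :: cwsParts ws
termination_by l => l.length
decreasing_by
  · exact Nat.lt_succ_of_le (ws.length_dropWhile_le _)
  · exact Nat.lt_succ_self _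

def convert_words_to_sentence_alt (words : List String) : String × String :=
  (PySem.Str.strip (PySem.Str.join " " (cwsParts words)),
   PySem.Str.strip (PySem.Str.join " " words))

-- ===== PRECONDITION & SPEC =====
def Spec_convert_words_to_sentence (words : List String) (out : String × String) : Prop := out = convert_words_to_sentence_alt words
instance (words : List String) (out : String × String) : Decidable (Spec_convert_words_to_sentence words out) := by unfold Spec_convert_words_to_sentence; infer_instance

-- ===== CLAIM (what is proved, stated in full; the proofs are below) =====
def Claim_equal_convert_words_to_sentence : Prop := ∀ (words : List String), Dom_convert_words_to_sentence words → Spec_convert_words_to_sentence words (convert_words_to_sentence words)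

-- ===== LEMMAS AND PROOFS =====

-- the list of words A keeps for new_sentence, given the incoming prev_mask flag
def cwsKept : Bool → List String → List String
  | _, [] => []
  | p, w :: ws =>
    if p && (w == "<mask>") then cwsKept p ws else w :: cwsKept (w == "<mask>") ws

-- each word prefixed by ' ' and concatenated (the shape A's accumulation produces)
def cwsSepCat (l : List String) : String := l.foldr (fun w acc => " " ++ w ++ acc) ""

lemma cwsFoldA : ∀ (words : List String) (p : Bool) (a s : String),
    words.foldl cwsStepA (p, a, s)
      = ((words.foldl cwsStepA (p, a, s)).1, a ++ cwsSepCat words, s ++ cwsSepCat (cwsKept p words))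
  | [], p, a, s => by simp [cwsSepCat, cwsKept]
  | w :: ws, p, a, s => by
    simp only [List.foldl_cons]
    by_cases h : (p && (w == "<mask>")) = true
    · rw [show cwsStepA (p, a, s) w = (p, a ++ " " ++ w, s) from by simp [cwsStepA, h]]
      rw [cwsFoldA ws p (a ++ " " ++ w) s]
      simp [cwsSepCat, cwsKept, h, String.append_assoc]
    · have h' : (p && (w == "<mask>")) = false := by simpa using h
      rw [show cwsStepA (p, a, s) w = ((w == "<mask>"), a ++ " " ++ w, s ++ " " ++ w) from by
        simp [cwsStepA, h']]
      rw [cwsFoldA ws (w == "<mask>") (a ++ " " ++ w) (s ++ " " ++ w)]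
      simp [cwsSepCat, cwsKept, h', String.append_assoc]

lemma cwsKept_true (ws : List String) :
    cwsKept true ws = cwsKept false (ws.dropWhile (· == "<mask>")) := by
  induction ws with
  | nil => rfl
  | cons w ws ih =>
    by_cases h : (w == "<mask>") = true
    · simp [cwsKept, h, List.dropWhile, ih]
    · have h' : (w == "<mask>") = false := by simpa using h
      simp [cwsKept, h', List.dropWhile]

lemma cwsKept_false_eq_parts : ∀ ws : List String, cwsKept false ws = cwsParts ws := by
  intro ws
  induction ws using cwsParts.induct with
  | case1 => simp [cwsKept, cwsParts]
  | case2 w ws h ih =>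
    rw [cwsKept, if_neg (by simp), h, cwsKept_true, ih, cwsParts, if_pos h]
  | case3 w ws h ih =>
    have h' : (w == "<mask>") = false := by simpa using h
    rw [cwsKept, if_neg (by simp [h']), h', ih, cwsParts, if_neg (by simp [h'])]

lemma cwsStrip_space (s : String) :
    PySem.Str.strip (" " ++ s) = PySem.Str.strip s := by
  apply String.toList_injective
  have hsp : PySem.Chars.isspace ' ' = true := by decide
  simp [PySem.Str.toList_strip, PySem.Chars.strip, PySem.Chars.lstrip, hsp]

lemma cwsSepCat_cons_join : ∀ (w : String) (ws : List String),
    cwsSepCat (w :: ws) = " " ++ PySem.Str.join " " (w :: ws)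
  | w, [] => by
    apply String.toList_injective
    simp [cwsSepCat, PySem.Str.toList_join, PySem.Chars.join_singleton]
  | w, v :: ws => by
    have ih := cwsSepCat_cons_join v ws
    apply String.toList_injective
    have h1 : cwsSepCat (w :: v :: ws) = " " ++ w ++ cwsSepCat (v :: ws) := rfl
    rw [h1, ih]
    simp [PySem.Str.toList_join, PySem.Chars.join_cons_cons]

lemma cwsSepCat_strip (l : List String) :
    PySem.Str.strip (cwsSepCat l) = PySem.Str.strip (PySem.Str.join " " l) := by
  cases l with
  | nil =>
    apply String.toList_injective
    simp [cwsSepCat, PySem.Str.toList_strip, PySem.Str.toList_join, PySem.Chars.join_nil]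
  | cons w ws => rw [cwsSepCat_cons_join, cwsStrip_space]

-- ===== VERDICT (by name: the statement is the Claim_ definition above) =====
theorem convert_words_to_sentence_spec : Claim_equal_convert_words_to_sentence := by
  intro words _
  unfold Spec_convert_words_to_sentence convert_words_to_sentence convert_words_to_sentence_alt
  rw [cwsFoldA words false "" "", cwsKept_false_eq_parts]
  simp only [String.empty_append]
  rw [cwsSepCat_strip, cwsSepCat_strip]
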